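-- pv_equiv track=rewrite | github.com/limiao06/DSTC4 | scripts/dstc_thu/temp_stat_slot_property.py | find_slot_property
-- ===== SOURCE A (Python) =====
-- def find_slot_property(dataset):
-- 	slot_count_dic = {}
-- 	for call in dataset:
-- 		for (log_utter, label_utter) in call:
-- 			if 'frame_label' in label_utter:
-- 				frame_label = label_utter['frame_label']
-- 				for slot in frame_label:
-- 					if slot not in slot_count_dic:
-- 						slot_count_dic[slot] = [0,0]
-- 					slot_count_dic[slot][0] += 1
-- 					if len(frame_label[slot]) > 1:
-- 						slot_count_dic[slot][1] += 1
--
-- 	return slot_count_dic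
-- ===== SOURCE B (Python) =====
-- def find_slot_property(dataset):
-- 	# Flatten to one stream of (slot, values) pairs, dedupe the slots in
-- 	# first-seen order, then count each slot's occurrences by scanning the stream.
-- 	events = [(slot, values)
-- 	          for call in dataset
-- 	          for (_log_utter, label_utter) in call
-- 	          if 'frame_label' in label_utter
-- 	          for (slot, values) in label_utter['frame_label'].items()]
-- 	slots = list(dict.fromkeys(s for s, _ in events))
-- 	return {s: [sum(1 for t, _ in events if t == s),
-- 	            sum(1 for t, v in events if t == s and len(v) > 1)]
-- 	        for s in slots}
-- ===== Notes on version B (the rewrite author's own statement) =====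
-- stated objective: alternative
-- what changed: B replaces A's incrementally mutated dict of [count,multi] pairs by a flatten/dedupe/scan pipeline: it collects the flat stream of (slot, values) events, dedupes the slot names in first-seen order, and computes each slot's two counts by scanning the event stream per slot (no running tallies at all).
import Mathlib
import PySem

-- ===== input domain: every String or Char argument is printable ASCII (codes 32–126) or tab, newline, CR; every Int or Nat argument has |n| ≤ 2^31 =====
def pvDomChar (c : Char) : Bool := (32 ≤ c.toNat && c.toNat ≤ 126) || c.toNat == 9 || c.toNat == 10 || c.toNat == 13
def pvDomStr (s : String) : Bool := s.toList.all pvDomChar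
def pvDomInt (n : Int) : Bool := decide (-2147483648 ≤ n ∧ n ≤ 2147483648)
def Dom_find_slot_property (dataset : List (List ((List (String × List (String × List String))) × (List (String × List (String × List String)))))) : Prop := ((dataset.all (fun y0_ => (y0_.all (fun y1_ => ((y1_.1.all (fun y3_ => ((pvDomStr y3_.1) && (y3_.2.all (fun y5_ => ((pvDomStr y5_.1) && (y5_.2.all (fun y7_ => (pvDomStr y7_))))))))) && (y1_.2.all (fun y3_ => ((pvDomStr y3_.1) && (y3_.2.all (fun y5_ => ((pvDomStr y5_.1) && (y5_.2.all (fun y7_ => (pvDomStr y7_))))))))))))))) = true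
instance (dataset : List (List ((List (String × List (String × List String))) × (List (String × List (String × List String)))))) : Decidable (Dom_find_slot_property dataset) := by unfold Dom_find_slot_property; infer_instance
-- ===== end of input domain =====

-- B replaces A's incrementally mutated dict of [count, multi] pairs by a
-- flatten / dedupe / scan-per-slot pipeline (objective: alternative).

-- ===== PORT A =====
def find_slot_property (dataset : List (List ((List (String × List (String × List String))) × (List (String × List (String × List String)))))) : List (String × List Int) :=
  (dataset.foldl (fun slot_count_dic call =>
    call.foldl (fun slot_count_dic lp =>
      let label_utter := PySem.Dict.ofList lp.2
      if label_utter.contains "frame_label" then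
        let frame_label := PySem.Dict.ofList (label_utter.getD "frame_label" [])
        frame_label.keys.foldl (fun slot_count_dic slot =>
          let d := if slot_count_dic.contains slot then slot_count_dic
                   else slot_count_dic.insert slot [0, 0]
          -- slot_count_dic[slot][0] += 1 (in-place list mutation = re-insert at same position)
          let v := d.getD slot []
          let v := PySem.List.pySetD v 0 (PySem.List.pyGetD v 0 0 + 1)
          let v := if PySem.List.len (frame_label.getD slot []) > 1
                   then PySem.List.pySetD v 1 (PySem.List.pyGetD v 1 0 + 1) else v
          d.insert slot v) slot_count_dic
      else slot_count_dic) slot_count_dic)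
    (PySem.Dict.empty : PySem.Dict String (List Int))).items

-- ===== PORT B =====
def find_slot_property_alt (dataset : List (List ((List (String × List (String × List String))) × (List (String × List (String × List String)))))) : List (String × List Int) :=
  let events : List (String × List String) :=
    dataset.flatMap (fun call =>
      call.flatMap (fun lp =>
        let label_utter := PySem.Dict.ofList lp.2
        if label_utter.contains "frame_label" then
          (PySem.Dict.ofList (label_utter.getD "frame_label" [])).items
        else []))
  let slots := PySem.List.dedup (events.map Prod.fst)
  slots.map (fun s =>
    (s, ([events.foldl (fun n e => if e.1 == s then n + 1 else n) 0,
          events.foldl (fun n e => if e.1 == s && decide (1 < PySem.List.len e.2) then n + 1 else n) 0] : List Int)))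

-- ===== PRECONDITION & SPEC =====
def Spec_find_slot_property (dataset : List (List ((List (String × List (String × List String))) × (List (String × List (String × List String)))))) (out : List (String × List Int)) : Prop := out = find_slot_property_alt dataset
instance (dataset : List (List ((List (String × List (String × List String))) × (List (String × List (String × List String)))))) (out : List (String × List Int)) : Decidable (Spec_find_slot_property dataset out) := by unfold Spec_find_slot_property; infer_instance

-- ===== CLAIM (what is proved, stated in full; the proofs are below) =====
def Claim_equal_find_slot_property : Prop := ∀ (dataset : List (List ((List (String × List (String × List String))) × (List (String × List (String × List String)))))), Dom_find_slot_property dataset → Spec_find_slot_property dataset (find_slot_property dataset)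

-- ===== LEMMAS AND PROOFS =====

-- A's per-slot dict update, phrased on one (slot, values) event.
def pvStepA (d : PySem.Dict String (List Int)) (e : String × List String) : PySem.Dict String (List Int) :=
  let d1 := if d.contains e.1 then d else d.insert e.1 [0, 0]
  let v := d1.getD e.1 []
  let v := PySem.List.pySetD v 0 (PySem.List.pyGetD v 0 0 + 1)
  let v := if PySem.List.len e.2 > 1 then PySem.List.pySetD v 1 (PySem.List.pyGetD v 1 0 + 1) else v
  d1.insert e.1 v

def pvEvents (dataset : List (List ((List (String × List (String × List String))) × (List (String × List (String × List String)))))) : List (String × List String) :=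
  dataset.flatMap (fun call =>
    call.flatMap (fun lp =>
      let label_utter := PySem.Dict.ofList lp.2
      if label_utter.contains "frame_label" then
        (PySem.Dict.ofList (label_utter.getD "frame_label" [])).items
      else []))

def pvCntT (s : String) (es : List (String × List String)) : Int :=
  (es.countP (fun e => e.1 == s) : Int)

def pvCntM (s : String) (es : List (String × List String)) : Int :=
  (es.countP (fun e => e.1 == s && decide (1 < PySem.List.len e.2)) : Int)

-- B's answer as a function of the event stream
def pvOut (p : List (String × List String)) : List (String × List Int) :=
  (PySem.List.dedup (p.map Prod.fst)).map (fun s => (s, ([pvCntT s p, pvCntM s p] : List Int)))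

lemma pvCntT_append (t : String) (p : List (String × List String)) (e : String × List String) :
    pvCntT t (p ++ [e]) = pvCntT t p + if e.1 == t then 1 else 0 := by
  simp [pvCntT, List.countP_append, List.countP_cons]

lemma pvCntM_append (t : String) (p : List (String × List String)) (e : String × List String) :
    pvCntM t (p ++ [e]) = pvCntM t p + if e.1 == t && decide (1 < PySem.List.len e.2) then 1 else 0 := by
  simp [pvCntM, List.countP_append, List.countP_cons]

lemma pvCntT_zero_of_not_mem (t : String) (p : List (String × List String))
    (h : t ∉ p.map Prod.fst) : pvCntT t p = 0 := by
  simp only [pvCntT]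
  norm_cast
  rw [List.countP_eq_zero]
  intro e he hbe
  exact h (List.mem_map.2 ⟨e, he, (beq_iff_eq.1 hbe)⟩)

lemma pvCntM_zero_of_not_mem (t : String) (p : List (String × List String))
    (h : t ∉ p.map Prod.fst) : pvCntM t p = 0 := by
  simp only [pvCntM]
  norm_cast
  rw [List.countP_eq_zero]
  intro e he hbe
  exact h (List.mem_map.2 ⟨e, he, (beq_iff_eq.1 (Bool.and_elim_left hbe))⟩)

lemma pvOut_keys (p : List (String × List String)) :
    (pvOut p).map Prod.fst = PySem.List.dedup (p.map Prod.fst) := by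
  simp [pvOut, List.map_map, Function.comp_def]

lemma pvStep_out (dA : PySem.Dict String (List Int)) (p : List (String × List String))
    (e : String × List String) (h : dA.items = pvOut p) :
    (pvStepA dA e).items = pvOut (p ++ [e]) := by
  obtain ⟨s, vs⟩ := e
  have hkeys : dA.keys = PySem.List.dedup (p.map Prod.fst) := by
    show dA.items.map Prod.fst = _
    rw [h, pvOut_keys]
  have hnd : dA.keys.Nodup := by rw [hkeys]; exact PySem.List.nodup_dedup _
  have hded : PySem.List.dedup (p.map Prod.fst ++ [s])
      = PySem.Set.add (PySem.List.dedup (p.map Prod.fst)) s := by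
    simp only [PySem.List.dedup_eq_ofList]
    exact PySem.Set.ofList_append_singleton _ _
  by_cases hmem : s ∈ PySem.List.dedup (p.map Prod.fst)
  · -- slot already seen
    have hc : dA.contains s = true :=
      (PySem.Dict.contains_iff_mem_keys dA s).2 (hkeys ▸ hmem)
    have hmemi : (s, ([pvCntT s p, pvCntM s p] : List Int)) ∈ dA.items := by
      rw [h]; exact List.mem_map.2 ⟨s, hmem, rfl⟩
    have hgetD : dA.getD s [] = ([pvCntT s p, pvCntM s p] : List Int) :=
      PySem.Dict.getD_of_mem_items dA hmemi hnd []
    show (pvStepA dA (s, vs)).items = _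
    simp only [pvStepA, hc, if_true, hgetD]
    rw [PySem.Dict.items_insert_of_contains dA _ hc, h]
    simp only [pvOut, List.map_append, List.map_cons, List.map_nil, hded,
               PySem.Set.add_of_mem hmem, List.map_map]
    refine List.map_congr_left (fun t ht => ?_)
    by_cases hts : t = s
    · subst hts
      simp only [Function.comp, beq_self_eq_true, if_true,
                 pvCntT_append, pvCntM_append, beq_self_eq_true, Bool.true_and]
      simp [PySem.List.pySetD, PySem.List.pySet?, PySem.List.pyGetD,
            PySem.List.pyGet?, PySem.List.pyIdx?, PySem.List.len, gt_iff_lt]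
      split_ifs <;> simp
    · have hbeq : (s == t) = false := beq_eq_false_iff_ne.2 (fun hst => hts hst.symm)
      simp only [Function.comp, beq_eq_false_iff_ne.2 hts,
                 pvCntT_append, pvCntM_append, hbeq, Bool.false_and]
      simp
  · -- fresh slot
    have hc : dA.contains s = false := by
      cases hcc : dA.contains s with
      | false => rfl
      | true => exact absurd (hkeys ▸ (PySem.Dict.contains_iff_mem_keys dA s).1 hcc) hmem
    have hnp : s ∉ p.map Prod.fst := fun hsp =>
      hmem ((PySem.List.mem_dedup _ _).2 hsp)
    show (pvStepA dA (s, vs)).items = _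
    simp only [pvStepA, hc, if_false, Bool.false_eq_true,
               PySem.Dict.getD_insert_self, PySem.Dict.insert_insert_self]
    rw [PySem.Dict.items_insert_of_not_contains dA _ hc, h]
    simp only [pvOut, List.map_append, List.map_cons, List.map_nil, hded,
               PySem.Set.add_of_not_mem hmem]
    congr 1
    · refine List.map_congr_left (fun t ht => ?_)
      have hts : t ≠ s := fun hts => hmem (hts ▸ ht)
      have hbeq : (s == t) = false := beq_eq_false_iff_ne.2 (fun hst => hts hst.symm)
      rw [pvCntT_append, pvCntM_append]
      simp [hbeq]
    · rw [pvCntT_append, pvCntM_append,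
          pvCntT_zero_of_not_mem s p hnp, pvCntM_zero_of_not_mem s p hnp]
      simp [PySem.List.pySetD, PySem.List.pySet?, PySem.List.pyGetD,
            PySem.List.pyGet?, PySem.List.pyIdx?, PySem.List.len, gt_iff_lt]
      split_ifs <;> simp

lemma pvFold_out (es : List (String × List String)) (p : List (String × List String))
    (dA : PySem.Dict String (List Int)) (h : dA.items = pvOut p) :
    (es.foldl pvStepA dA).items = pvOut (p ++ es) := by
  induction es generalizing p dA with
  | nil => simpa using h
  | cons e es ih =>
      have := ih (p ++ [e]) (pvStepA dA e) (pvStep_out dA p e h)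
      simpa using this

-- A's nested loops are the event-stream fold of pvStepA
lemma pvA_eq_fold (dataset : List (List ((List (String × List (String × List String))) × (List (String × List (String × List String)))))) :
    find_slot_property dataset = ((pvEvents dataset).foldl pvStepA PySem.Dict.empty).items := by
  unfold find_slot_property pvEvents
  rw [List.foldl_flatMap]
  congr 1
  refine List.foldl_ext _ _ _ (fun d call _ => ?_)
  rw [List.foldl_flatMap]
  refine List.foldl_ext _ _ _ (fun d lp _ => ?_)
  by_cases hfl : (PySem.Dict.ofList lp.2).contains "frame_label" = true
  · simp only [hfl, if_true]
    set fl := PySem.Dict.ofList ((PySem.Dict.ofList lp.2).getD "frame_label" []) with hfldef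
    rw [PySem.Dict.items_eq_map_keys fl (PySem.Dict.nodup_keys_ofList _) [],
        List.foldl_map]
    refine List.foldl_ext _ _ _ (fun d slot _ => ?_)
    simp only [pvStepA]
  · have : (PySem.Dict.ofList lp.2).contains "frame_label" = false := by
      cases h : (PySem.Dict.ofList lp.2).contains "frame_label" with
      | false => rfl
      | true => exact absurd h hfl
    simp [this]

-- B is pvOut of the event stream
lemma pvB_eq_out (dataset : List (List ((List (String × List (String × List String))) × (List (String × List (String × List String)))))) :
    find_slot_property_alt dataset = pvOut (pvEvents dataset) := by
  unfold find_slot_property_alt pvOut pvCntT pvCntM pvEvents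
  refine List.map_congr_left (fun s _ => ?_)
  rw [PySem.List.foldl_if_add_one, PySem.List.foldl_if_add_one]
  simp

-- ===== VERDICT (by name: the statement is the Claim_ definition above) =====
theorem find_slot_property_spec : Claim_equal_find_slot_property := by
  intro dataset _
  show find_slot_property dataset = find_slot_property_alt dataset
  rw [pvA_eq_fold, pvB_eq_out]
  have := pvFold_out (pvEvents dataset) [] PySem.Dict.empty rfl
  simpa using this
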